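-- pv_equiv track=rewrite | github.com/martinjohansson93/aoc | 2019/4/solution.py | isDouble
-- ===== SOURCE A (Python) =====
-- def isTriple(value, i):
--     if i > 1:
--         if value[i-1] == value[i] and value[i-2] == value[i]:
--             return True
--     if i > 0 and i < len(value)-1:
--         if value[i-1] == value[i] and value[i+1] == value[i]:
--             return True
--     if i < len(value)-2:
--         if value[i+1] == value[i] and value[i+2] == value[i]:
--             return True
--     return False
--
-- def isDouble(value, secondSolution=False):
--     for i in range(1, len(value)):
--         if i > 0:
--             if value[i-1] == value[i]:
--                 if isTriple(value, i) and secondSolution: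
--                     continue
--                 return True
--     return False
-- ===== SOURCE B (Python) =====
-- def isDouble(value, secondSolution=False):
--     # one pass: collect maximal run lengths, then test exactly-2 / at-least-2
--     runs = []
--     prev = None
--     n = 0
--     for c in value:
--         if c == prev:
--             n += 1
--         else:
--             if n:
--                 runs.append(n)
--             prev = c
--             n = 1
--     if n:
--         runs.append(n)
--     if secondSolution:
--         return any(r == 2 for r in runs)
--     return any(r >= 2 for r in runs)
-- ===== Notes on version B (the rewrite author's own statement) =====
-- stated objective: alternative
-- what changed: B does a single run-length scan (maximal equal runs collected with a prev/count fold) and then tests whether some run has length exactly 2 (secondSolution) or at least 2, replacing A's per-index neighbour lookups and the isTriple helper with its three index-window checks.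
import Mathlib
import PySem

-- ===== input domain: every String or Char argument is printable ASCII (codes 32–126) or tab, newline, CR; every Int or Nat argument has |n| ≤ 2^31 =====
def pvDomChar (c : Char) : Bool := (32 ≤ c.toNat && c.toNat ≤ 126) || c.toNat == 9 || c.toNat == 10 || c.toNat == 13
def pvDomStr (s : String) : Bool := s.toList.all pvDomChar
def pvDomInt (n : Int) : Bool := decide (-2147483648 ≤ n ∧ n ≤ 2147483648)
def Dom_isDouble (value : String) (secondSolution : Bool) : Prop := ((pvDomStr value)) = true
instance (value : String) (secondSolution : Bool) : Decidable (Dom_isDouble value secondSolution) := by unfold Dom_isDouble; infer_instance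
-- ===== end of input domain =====

-- B replaces A's per-index neighbour/triple window checks by a single run-length scan
-- followed by an 'exactly 2' / 'at least 2' test over the runs (objective: alternative).

-- ===== PORT A =====
-- helper isTriple, transliterated (sequential guarded ifs; indices via pyGet?)
def isTriple (value : List Char) (i : Nat) : Bool :=
  if 1 < i &&
     (PySem.List.pyGet? value ((i : Int) - 1) == PySem.List.pyGet? value (i : Int) &&
      PySem.List.pyGet? value ((i : Int) - 2) == PySem.List.pyGet? value (i : Int)) then
    true
  else if (0 < i && (i : Int) < (value.length : Int) - 1) &&
     (PySem.List.pyGet? value ((i : Int) - 1) == PySem.List.pyGet? value (i : Int) &&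
      PySem.List.pyGet? value ((i : Int) + 1) == PySem.List.pyGet? value (i : Int)) then
    true
  else if ((i : Int) < (value.length : Int) - 2) &&
     (PySem.List.pyGet? value ((i : Int) + 1) == PySem.List.pyGet? value (i : Int) &&
      PySem.List.pyGet? value ((i : Int) + 2) == PySem.List.pyGet? value (i : Int)) then
    true
  else
    false

-- the 'for i in range(1, len(value))' loop with early return / continue
def isDoubleLoop (value : List Char) (second : Bool) (i : Nat) : Bool :=
  if _h : i < value.length then
    if 0 < i then
      if PySem.List.pyGet? value ((i : Int) - 1) == PySem.List.pyGet? value (i : Int) then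
        if isTriple value i && second then isDoubleLoop value second (i + 1) else true
      else isDoubleLoop value second (i + 1)
    else isDoubleLoop value second (i + 1)
  else
    false
termination_by value.length - i

def isDouble (value : String) (secondSolution : Bool) : Bool :=
  isDoubleLoop value.toList secondSolution 1

-- ===== PORT B =====
-- one pass over the characters collecting maximal run lengths, then an any-test
def isDouble_alt (value : String) (secondSolution : Bool) : Bool :=
  let st := value.toList.foldl
    (fun (st : List Int × Option Char × Int) c =>
      let (runs, prev, n) := st
      if some c == prev then (runs, prev, n + 1)
      else ((if n != 0 then runs ++ [n] else runs), some c, 1))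
    ([], none, 0)
  let runs := if st.2.2 != 0 then st.1 ++ [st.2.2] else st.1
  if secondSolution then runs.any (fun r => r == 2)
  else runs.any (fun r => decide (2 ≤ r))

-- ===== PRECONDITION & SPEC =====
def Spec_isDouble (value : String) (secondSolution : Bool) (out : Bool) : Prop := out = isDouble_alt value secondSolution
instance (value : String) (secondSolution : Bool) (out : Bool) : Decidable (Spec_isDouble value secondSolution out) := by unfold Spec_isDouble; infer_instance

-- ===== CLAIM (what is proved, stated in full; the proofs are below) =====
def Claim_equal_isDouble : Prop := ∀ (value : String) (secondSolution : Bool), Dom_isDouble value secondSolution → Spec_isDouble value secondSolution (isDouble value secondSolution)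

-- ===== LEMMAS AND PROOFS =====

-- windowed structural reading of A's loop: b = "previous-previous char equals p"
def gA (second : Bool) : Bool → Char → List Char → Bool
  | _, _, [] => false
  | b, p, c :: rest =>
    if p == c then
      if (b || rest.head? == some c) && second then gA second true c rest else true
    else gA second false c rest

-- run-length recursion: p current run char, n its count so far, pred tested at run ends
def hrGo (pred : Int → Bool) : Char → Int → List Char → Bool
  | _, n, [] => pred n
  | p, n, c :: cs => if c == p then hrGo pred p (n + 1) cs else (pred n || hrGo pred c 1 cs)

theorem isTriple_window (pre u' : List Char) (p : Char) :
    isTriple (pre ++ p :: p :: u') (pre.length + 1) =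
      ((pre.getLast? == some p) || (u'.head? == some p)) := by
  have c1 : ((pre.length + 1 : Nat) : Int) - 1 = ((pre.length : Nat) : Int) := by push_cast; ring
  have c3 : ((pre.length + 1 : Nat) : Int) + 1 = ((pre.length + 2 : Nat) : Int) := by push_cast; ring
  have c4 : ((pre.length + 1 : Nat) : Int) + 2 = ((pre.length + 3 : Nat) : Int) := by push_cast; ring
  rw [isTriple, c1, c3, c4]
  simp only [PySem.List.pyGet?_natCast]
  have hlen : (pre ++ p :: p :: u').length = pre.length + u'.length + 2 := by simp; omega
  have g0 : (pre ++ p :: p :: u')[pre.length]? = some p := by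
    rw [List.getElem?_append_right le_rfl]; simp
  have g1 : (pre ++ p :: p :: u')[pre.length + 1]? = some p := by
    rw [List.getElem?_append_right (by omega)]
    have : pre.length + 1 - pre.length = 1 := by omega
    rw [this]; rfl
  have g2 : (pre ++ p :: p :: u')[pre.length + 2]? = u'[0]? := by
    rw [List.getElem?_append_right (by omega)]
    have : pre.length + 2 - pre.length = 2 := by omega
    rw [this]; rfl
  have g3 : (pre ++ p :: p :: u')[pre.length + 3]? = u'[1]? := by
    rw [List.getElem?_append_right (by omega)]
    have : pre.length + 3 - pre.length = 3 := by omega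
    rw [this]; rfl
  have gm : pre ≠ [] → PySem.List.pyGet? (pre ++ p :: p :: u') (((pre.length + 1 : Nat) : Int) - 2) = pre.getLast? := by
    intro h
    rcases List.eq_nil_or_concat pre with rfl | ⟨pre₀, q, rfl⟩
    · exact absurd rfl h
    · simp only [List.concat_eq_append]
      have e : (((pre₀ ++ [q]).length + 1 : Nat) : Int) - 2 = ((pre₀.length : Nat) : Int) := by
        simp; omega
      rw [e, PySem.List.pyGet?_natCast, List.append_assoc, List.getElem?_append_right le_rfl]
      simp
  rw [hlen, g0, g1, g2, g3]
  simp only [beq_self_eq_true, Bool.true_and]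
  split_ifs with h1 h2 h3
  · simp only [Bool.and_eq_true, decide_eq_true_eq, beq_iff_eq] at h1
    obtain ⟨ha, hb⟩ := h1
    have hne : pre ≠ [] := by intro e; rw [e] at ha; simp at ha
    rw [gm hne] at hb
    simp [hb]
  · simp only [Bool.and_eq_true, decide_eq_true_eq, beq_iff_eq] at h2
    obtain ⟨⟨-, hlt⟩, hb⟩ := h2
    have hhd : u'.head? = some p := by rw [List.head?_eq_getElem?]; exact hb
    simp [hhd]
  · simp only [Bool.and_eq_true, decide_eq_true_eq, beq_iff_eq] at h3
    obtain ⟨hlt, hb, -⟩ := h3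
    have hhd : u'.head? = some p := by rw [List.head?_eq_getElem?]; exact hb
    simp [hhd]
  · have hA : (pre.getLast? == some p) = false := by
      apply Bool.eq_false_iff.mpr
      intro hb
      simp only [beq_iff_eq] at hb
      have hne : pre ≠ [] := by intro e; rw [e] at hb; simp at hb
      have h0 : 0 < pre.length := List.length_pos_of_ne_nil hne
      apply h1
      simp only [Bool.and_eq_true, decide_eq_true_eq, beq_iff_eq]
      exact ⟨by omega, by rw [gm hne]; exact hb⟩
    have hB : (u'.head? == some p) = false := by
      apply Bool.eq_false_iff.mpr
      intro hb
      simp only [beq_iff_eq] at hb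
      have h0 : u'[0]? = some p := by rw [← List.head?_eq_getElem?]; exact hb
      have hl : 0 < u'.length := by
        cases u' with
        | nil => simp at hb
        | cons d u'' => simp
      apply h2
      simp only [Bool.and_eq_true, decide_eq_true_eq, beq_iff_eq]
      exact ⟨⟨by omega, by push_cast; omega⟩, h0⟩
    simp [hA, hB]


theorem bridgeA (u : List Char) : ∀ (pre : List Char) (p : Char) (second : Bool),
    isDoubleLoop (pre ++ p :: u) second (pre.length + 1) =
      gA second (pre.getLast? == some p) p u := by
  induction u with
  | nil =>
    intro pre p second
    rw [isDoubleLoop]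
    have h : ¬ (pre.length + 1 < (pre ++ [p]).length) := by simp
    simp [gA]
  | cons c u' ih =>
    intro pre p second
    rw [isDoubleLoop]
    have hlt : pre.length + 1 < (pre ++ p :: c :: u').length := by simp
    have e1 : PySem.List.pyGet? (pre ++ p :: c :: u') ((pre.length : Int)) = some p := by
      rw [PySem.List.pyGet?_natCast, List.getElem?_append_right le_rfl]; simp
    have e2 : PySem.List.pyGet? (pre ++ p :: c :: u') ((pre.length : Int) + 1) = some c := by
      have hc : ((pre.length : Int) + 1) = ((pre.length + 1 : Nat) : Int) := by push_cast; ring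
      rw [hc, PySem.List.pyGet?_natCast, List.getElem?_append_right (by omega)]
      have h1 : pre.length + 1 - pre.length = 1 := by omega
      rw [h1]; rfl
    by_cases hpc : p = c
    · subst hpc
      have ht := isTriple_window pre u' p
      have hrec : isDoubleLoop (pre ++ p :: p :: u') second (pre.length + 1 + 1) = gA second true p u' := by
        have h := ih (pre ++ [p]) p second
        simpa using h
      simp [e1, e2, ht, hrec, gA]
    · have hf : (p == c) = false := by simp [hpc]
      have hrec : isDoubleLoop (pre ++ p :: c :: u') second (pre.length + 1 + 1) = gA second false c u' := by
        have h := ih (pre ++ [p]) c second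
        simpa [hf] using h
      simp [e1, e2, gA, hf, hrec]


theorem lemFalse (cs : List Char) : ∀ (p : Char) (n : Int) (b : Bool), 1 ≤ n →
    hrGo (fun r => decide (2 ≤ r)) p n cs = (decide (2 ≤ n) || gA false b p cs) := by
  induction cs with
  | nil => intro p n b _; simp [hrGo, gA]
  | cons c cs ih =>
    intro p n b h
    by_cases hpc : p = c
    · subst hpc
      have h2 : (2 ≤ n + 1) := by omega
      simp [hrGo, gA, ih p (n + 1) b (by omega), h2]
    · have h1 : (p == c) = false := by simp [hpc]
      have h1' : (c == p) = false := by simp [Ne.symm hpc]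
      simp [hrGo, gA, h1, h1', ih c 1 false (by norm_num)]

theorem lemTrue (cs : List Char) : ∀ (p : Char) (n : Int), 1 ≤ n →
    (n = 2 → cs.head? = some p) →
    gA true (decide (2 ≤ n)) p cs = hrGo (fun r => r == 2) p n cs := by
  induction cs with
  | nil =>
    intro p n h hh
    have : n ≠ 2 := fun e => by simpa using hh e
    simp [hrGo, gA, this]
  | cons c cs ih =>
    intro p n h hh
    by_cases hpc : p = c
    · subst hpc
      by_cases hg : (decide (2 ≤ n) || cs.head? == some p) = true
      · have hn1 : (2 ≤ n + 1) := by omega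
        have hh' : n + 1 = 2 → cs.head? = some p := by
          intro e
          have hn : n = 1 := by omega
          simp [hn] at hg
          simpa using hg
        have := ih p (n + 1) (by omega) hh'
        simp [hn1] at this
        simp [gA, hrGo, hg, this]
      · have hg' : (decide (2 ≤ n) || cs.head? == some p) = false :=
          Bool.eq_false_iff.mpr hg
        obtain ⟨ha, hhd⟩ := Bool.or_eq_false_iff.mp hg'
        have hn : n = 1 := by simp at ha; omega
        subst hn
        have gAval : gA true (decide (2 ≤ (1 : Int))) p (p :: cs) = true := by
          simp [gA, hhd]
        rw [gAval]
        cases cs with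
        | nil => simp [hrGo]
        | cons d cs' =>
          have hdp : (d == p) = false := by simp at hhd; simp [hhd]
          simp [hrGo, hdp]
    · have h1 : (p == c) = false := by simp [hpc]
      have h1' : (c == p) = false := by simp [Ne.symm hpc]
      have hn2 : n ≠ 2 := by
        intro e; have := hh e; simp at this; exact hpc this.symm
      have := ih c 1 (by norm_num) (by intro e; omega)
      simp at this
      simp [gA, hrGo, h1, h1', hn2, this]

def stepB : List Int × Option Char × Int → Char → List Int × Option Char × Int :=
  fun st c =>
    let (runs, prev, n) := st
    if some c == prev then (runs, prev, n + 1)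
    else ((if n != 0 then runs ++ [n] else runs), some c, 1)

def finAny (pred : Int → Bool) (st : List Int × Option Char × Int) : Bool :=
  (if st.2.2 != 0 then st.1 ++ [st.2.2] else st.1).any pred

theorem bridgeB (cs : List Char) : ∀ (runs : List Int) (p : Char) (n : Int) (pred : Int → Bool),
    1 ≤ n →
    finAny pred (List.foldl stepB (runs, some p, n) cs) = (runs.any pred || hrGo pred p n cs) := by
  induction cs with
  | nil =>
    intro runs p n pred h
    have : n ≠ 0 := by omega
    simp [finAny, hrGo, this]
  | cons c cs ih =>
    intro runs p n pred h
    by_cases hpc : c = p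
    · subst hpc
      simp [stepB, hrGo, ih runs c (n + 1) pred (by omega)]
    · have h1 : (some c == some p) = false := by simp [hpc]
      have h1' : (c == p) = false := by simp [hpc]
      have hn : n ≠ 0 := by omega
      simp [stepB, hrGo, h1, h1', hn, ih (runs ++ [n]) c 1 pred (by norm_num), Bool.or_assoc]

-- ===== VERDICT (by name: the statement is the Claim_ definition above) =====
theorem foldB_eq (pred : Int → Bool) (p : Char) (cs : List Char) :
    finAny pred (List.foldl stepB ([], none, 0) (p :: cs)) = hrGo pred p 1 cs := by
  have h0 : stepB ([], none, 0) p = ([], some p, 1) := by simp [stepB]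
  rw [List.foldl_cons, h0, bridgeB cs [] p 1 pred le_rfl]
  simp

theorem isDouble_spec : Claim_equal_isDouble := by
  unfold Claim_equal_isDouble
  intro value second _dom
  unfold Spec_isDouble
  rcases hs : value.toList with _ | ⟨p, cs⟩
  · simp [isDouble, isDouble_alt, hs]
    rw [isDoubleLoop]
    simp
  · have hA : isDouble value second = gA second false p cs := by
      rw [isDouble, hs]
      simpa using bridgeA cs [] p second
    cases second with
    | false =>
      have hB : isDouble_alt value false = finAny (fun r => decide (2 ≤ r)) (List.foldl stepB ([], none, 0) (p :: cs)) := by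
        rw [isDouble_alt, hs]
        rfl
      rw [hA, hB, foldB_eq _ p cs, lemFalse cs p 1 false le_rfl]
      simp
    | true =>
      have hB : isDouble_alt value true = finAny (fun r => r == 2) (List.foldl stepB ([], none, 0) (p :: cs)) := by
        rw [isDouble_alt, hs]
        rfl
      have hT := lemTrue cs p 1 le_rfl (by intro e; exact absurd e (by norm_num))
      have hd : decide ((2 : Int) ≤ 1) = false := by norm_num
      rw [hd] at hT
      rw [hA, hB, foldB_eq _ p cs, ← hT]
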